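-- pv_equiv track=rewrite | github.com/finnnai/CoAssisted-Workspace | ar_invoicing.py | _bucket_for_days
-- ===== SOURCE A (Python) =====
-- AGING_BUCKETS = [
--     ("current", 0, 0),       # Not yet due
--     ("1-15", 1, 15),
--     ("16-30", 16, 30),
--     ("31-60", 31, 60),
--     ("61-90", 61, 90),
--     ("90+", 91, 10_000),
-- ]
--
-- def _bucket_for_days(days_past_due: int) -> str:
--     """Map days_past_due to a bucket label."""
--     if days_past_due <= 0:
--         return "current"
--     for label, lo, hi in AGING_BUCKETS:
--         if label == "current":
--             continue
--         if lo <= days_past_due <= hi: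
--             return label
--     return "90+"
-- ===== SOURCE B (Python) =====
-- import bisect
--
-- _THRESHOLDS = [15, 30, 60, 90]
-- _LABELS = ["1-15", "16-30", "31-60", "61-90", "90+"]
--
-- def _bucket_for_days(days_past_due: int) -> str:
--     if days_past_due <= 0:
--         return "current"
--     return _LABELS[bisect.bisect_left(_THRESHOLDS, days_past_due)]
-- ===== Notes on version B (the rewrite author's own statement) =====
-- stated objective: idiomatic
-- what changed: Replaced the linear scan over (label, lo, hi) bucket triples with a bisect_left lookup into a sorted threshold table paired with a label list.
import Mathlib
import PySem

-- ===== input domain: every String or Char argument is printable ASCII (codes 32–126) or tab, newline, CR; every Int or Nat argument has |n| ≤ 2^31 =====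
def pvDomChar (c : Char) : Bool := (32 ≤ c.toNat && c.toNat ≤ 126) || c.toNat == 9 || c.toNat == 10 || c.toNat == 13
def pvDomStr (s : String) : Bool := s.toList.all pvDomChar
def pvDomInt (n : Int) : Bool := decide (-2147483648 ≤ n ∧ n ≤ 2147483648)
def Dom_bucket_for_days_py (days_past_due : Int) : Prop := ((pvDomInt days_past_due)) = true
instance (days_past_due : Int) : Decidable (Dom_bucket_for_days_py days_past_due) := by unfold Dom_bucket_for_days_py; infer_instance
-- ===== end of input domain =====

-- B replaces A's linear scan over (label, lo, hi) triples with a bisect_left lookup into a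
-- sorted threshold table paired with a label list (idiomatic; return value identical).

-- ===== PORT A =====
-- AGING_BUCKETS constant
def AGING_BUCKETS : List (String × Int × Int) :=
  [("current", 0, 0), ("1-15", 1, 15), ("16-30", 16, 30),
   ("31-60", 31, 60), ("61-90", 61, 90), ("90+", 91, 10000)]

-- the for-loop with 'continue' and early return, as structural recursion over the list
def bucketLoop (days_past_due : Int) : List (String × Int × Int) → String
  | [] => "90+"
  | (label, lo, hi) :: rest =>
      if label == "current" then bucketLoop days_past_due rest
      else if lo ≤ days_past_due ∧ days_past_due ≤ hi then label
      else bucketLoop days_past_due rest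

def bucket_for_days_py (days_past_due : Int) : String :=
  if days_past_due ≤ 0 then "current"
  else bucketLoop days_past_due AGING_BUCKETS

-- ===== PORT B =====
def pvTHRESHOLDS : List Int := [15, 30, 60, 90]
def pvLABELS : List String := ["1-15", "16-30", "31-60", "61-90", "90+"]

-- bisect.bisect_left on a sorted list = number of elements strictly below x
def pvBisectLeft (xs : List Int) (x : Int) : Nat := xs.countP (· < x)

def bucket_for_days_py_alt (days_past_due : Int) : String :=
  if days_past_due ≤ 0 then "current"
  else pvLABELS.getD (pvBisectLeft pvTHRESHOLDS days_past_due) ""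

-- ===== PRECONDITION & SPEC =====
def Spec_bucket_for_days_py (days_past_due : Int) (out : String) : Prop := out = bucket_for_days_py_alt days_past_due
instance (days_past_due : Int) (out : String) : Decidable (Spec_bucket_for_days_py days_past_due out) := by unfold Spec_bucket_for_days_py; infer_instance

-- ===== CLAIM (what is proved, stated in full; the proofs are below) =====
def Claim_equal_bucket_for_days_py : Prop := ∀ (days_past_due : Int), Dom_bucket_for_days_py days_past_due → Spec_bucket_for_days_py days_past_due (bucket_for_days_py days_past_due)

-- ===== LEMMAS AND PROOFS =====

-- ===== VERDICT (by name: the statement is the Claim_ definition above) =====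
theorem bucket_for_days_py_spec : Claim_equal_bucket_for_days_py := by
  intro d _
  unfold Spec_bucket_for_days_py bucket_for_days_py bucket_for_days_py_alt
  by_cases h0 : d ≤ 0
  · simp [h0]
  · simp only [if_neg h0]
    simp only [bucketLoop, AGING_BUCKETS, pvBisectLeft, pvTHRESHOLDS, pvLABELS,
      List.countP, List.countP.go, List.getD, beq_iff_eq]
    by_cases h15 : d ≤ 15
    · have a1 : ¬ (15 : Int) < d := by omega
      have a2 : ¬ (30 : Int) < d := by omega
      have a3 : ¬ (60 : Int) < d := by omega
      have a4 : ¬ (90 : Int) < d := by omega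
      simp [a1, a2, a3, a4, show (1:Int) ≤ d ∧ d ≤ 15 from ⟨by omega, h15⟩]
    · by_cases h30 : d ≤ 30
      · have a1 : (15 : Int) < d := by omega
        have a2 : ¬ (30 : Int) < d := by omega
        have a3 : ¬ (60 : Int) < d := by omega
        have a4 : ¬ (90 : Int) < d := by omega
        simp [a1, a2, a3, a4, show ¬((1:Int) ≤ d ∧ d ≤ 15) from by omega,
          show (16:Int) ≤ d ∧ d ≤ 30 from ⟨by omega, h30⟩]
      · by_cases h60 : d ≤ 60
        · have a1 : (15 : Int) < d := by omega
          have a2 : (30 : Int) < d := by omega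
          have a3 : ¬ (60 : Int) < d := by omega
          have a4 : ¬ (90 : Int) < d := by omega
          simp [a1, a2, a3, a4, show ¬((1:Int) ≤ d ∧ d ≤ 15) from by omega,
            show ¬((16:Int) ≤ d ∧ d ≤ 30) from by omega,
            show (31:Int) ≤ d ∧ d ≤ 60 from ⟨by omega, h60⟩]
        · by_cases h90 : d ≤ 90
          · have a1 : (15 : Int) < d := by omega
            have a2 : (30 : Int) < d := by omega
            have a3 : (60 : Int) < d := by omega
            have a4 : ¬ (90 : Int) < d := by omega
            simp [a1, a2, a3, a4, show ¬((1:Int) ≤ d ∧ d ≤ 15) from by omega,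
              show ¬((16:Int) ≤ d ∧ d ≤ 30) from by omega,
              show ¬((31:Int) ≤ d ∧ d ≤ 60) from by omega,
              show (61:Int) ≤ d ∧ d ≤ 90 from ⟨by omega, h90⟩]
          · have a1 : (15 : Int) < d := by omega
            have a2 : (30 : Int) < d := by omega
            have a3 : (60 : Int) < d := by omega
            have a4 : (90 : Int) < d := by omega
            by_cases hbig : d ≤ 10000
            · simp [a1, a2, a3, a4, show ¬((1:Int) ≤ d ∧ d ≤ 15) from by omega,
                show ¬((16:Int) ≤ d ∧ d ≤ 30) from by omega,
                show ¬((31:Int) ≤ d ∧ d ≤ 60) from by omega,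
                show ¬((61:Int) ≤ d ∧ d ≤ 90) from by omega,
                show (91:Int) ≤ d ∧ d ≤ 10000 from ⟨by omega, hbig⟩]
            · simp [a1, a2, a3, a4, show ¬((1:Int) ≤ d ∧ d ≤ 15) from by omega,
                show ¬((16:Int) ≤ d ∧ d ≤ 30) from by omega,
                show ¬((31:Int) ≤ d ∧ d ≤ 60) from by omega,
                show ¬((61:Int) ≤ d ∧ d ≤ 90) from by omega,
                show ¬((91:Int) ≤ d ∧ d ≤ 10000) from by omega]
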